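-- pv_equiv track=rewrite | github.com/Zephyrenormalization/mysokoban | src/astar.py | find_boxes_and_goals
-- ===== SOURCE A (Python) =====
-- def find_boxes_and_goals(state, shape):
-- 	_, width = shape
-- 	boxes, goals, boxes_on_goal = [], [], []
-- 	for pos, char in enumerate(state):
-- 		if char == 'B':
-- 			boxes.append((pos // width, pos % width))
-- 		elif char in 'GL':
-- 			goals.append((pos // width, pos % width))
-- 		elif char == 'O':
-- 			boxes_on_goal.append((pos // width, pos % width))
-- 	return boxes, goals, boxes_on_goal
-- ===== SOURCE B (Python) =====
-- def find_boxes_and_goals(state, shape):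
-- 	_, width = shape
-- 	boxes = [divmod(i, width) for i, c in enumerate(state) if c == 'B']
-- 	goals = [divmod(i, width) for i, c in enumerate(state) if c in 'GL']
-- 	boxes_on_goal = [divmod(i, width) for i, c in enumerate(state) if c == 'O']
-- 	return boxes, goals, boxes_on_goal
-- ===== Notes on version B (the rewrite author's own statement) =====
-- stated objective: simpler
-- what changed: Replaces the single pass with a mutable elif chain and three accumulator lists by three independent filtering list comprehensions (one scan per category) using divmod.
import Mathlib
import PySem

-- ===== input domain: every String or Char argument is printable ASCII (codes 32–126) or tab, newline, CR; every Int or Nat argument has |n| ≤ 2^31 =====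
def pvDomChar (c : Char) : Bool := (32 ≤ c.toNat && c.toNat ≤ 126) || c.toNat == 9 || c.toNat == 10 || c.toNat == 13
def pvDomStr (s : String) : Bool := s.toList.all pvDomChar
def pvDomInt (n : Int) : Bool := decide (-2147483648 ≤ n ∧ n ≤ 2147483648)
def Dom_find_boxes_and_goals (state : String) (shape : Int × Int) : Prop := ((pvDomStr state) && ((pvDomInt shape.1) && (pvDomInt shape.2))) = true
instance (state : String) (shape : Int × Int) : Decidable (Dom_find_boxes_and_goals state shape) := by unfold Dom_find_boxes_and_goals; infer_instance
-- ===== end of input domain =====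

-- B replaces A's single pass with an elif chain by three independent filtering comprehensions (objective: simpler); same cost, not faster.


-- ===== PORT A =====
def find_boxes_and_goals (state : String) (shape : Int × Int) : (List (Int × Int)) × (List (Int × Int)) × (List (Int × Int)) :=
  let width := shape.2
  ((PySem.List.enumerate state.toList).foldl
    (fun (acc : (List (Int × Int)) × (List (Int × Int)) × (List (Int × Int))) pc =>
      let pos := pc.1
      let char := pc.2
      if char = 'B' then
        (acc.1 ++ [(PySem.Int.floordiv pos width, PySem.Int.mod pos width)], acc.2.1, acc.2.2)
      else if char = 'G' ∨ char = 'L' then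
        (acc.1, acc.2.1 ++ [(PySem.Int.floordiv pos width, PySem.Int.mod pos width)], acc.2.2)
      else if char = 'O' then
        (acc.1, acc.2.1, acc.2.2 ++ [(PySem.Int.floordiv pos width, PySem.Int.mod pos width)])
      else acc)
    ([], [], []))

-- ===== PORT B =====
def find_boxes_and_goals_alt (state : String) (shape : Int × Int) : (List (Int × Int)) × (List (Int × Int)) × (List (Int × Int)) :=
  let width := shape.2
  let boxes := ((PySem.List.enumerate state.toList).filter (fun pc => pc.2 = 'B')).map
    (fun pc => (PySem.Int.floordiv pc.1 width, PySem.Int.mod pc.1 width))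
  let goals := ((PySem.List.enumerate state.toList).filter (fun pc => pc.2 = 'G' ∨ pc.2 = 'L')).map
    (fun pc => (PySem.Int.floordiv pc.1 width, PySem.Int.mod pc.1 width))
  let boxes_on_goal := ((PySem.List.enumerate state.toList).filter (fun pc => pc.2 = 'O')).map
    (fun pc => (PySem.Int.floordiv pc.1 width, PySem.Int.mod pc.1 width))
  (boxes, goals, boxes_on_goal)

-- ===== PRECONDITION & SPEC =====
-- Pre_ excludes exactly the inputs where Python A raises ZeroDivisionError: width = 0 with some
-- 'B'/'G'/'L'/'O' character present (both Pythons raise there; the ports are total).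
def Pre_find_boxes_and_goals (state : String) (shape : Int × Int) : Prop :=
  shape.2 ≠ 0 ∨ ∀ c ∈ state.toList, c ≠ 'B' ∧ c ≠ 'G' ∧ c ≠ 'L' ∧ c ≠ 'O'
instance (state : String) (shape : Int × Int) : Decidable (Pre_find_boxes_and_goals state shape) := by unfold Pre_find_boxes_and_goals; infer_instance
def pvWitness_find_boxes_and_goals : String × (Int × Int) := ("B.GO", (2, 2))

def Spec_find_boxes_and_goals (state : String) (shape : Int × Int) (out : (List (Int × Int)) × (List (Int × Int)) × (List (Int × Int))) : Prop := out = find_boxes_and_goals_alt state shape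
instance (state : String) (shape : Int × Int) (out : (List (Int × Int)) × (List (Int × Int)) × (List (Int × Int))) : Decidable (Spec_find_boxes_and_goals state shape out) := by unfold Spec_find_boxes_and_goals; infer_instance

-- ===== CLAIM (what is proved, stated in full; the proofs are below) =====
def Claim_equal_find_boxes_and_goals : Prop := ∀ (state : String) (shape : Int × Int), Dom_find_boxes_and_goals state shape → Pre_find_boxes_and_goals state shape → Spec_find_boxes_and_goals state shape (find_boxes_and_goals state shape)

-- ===== LEMMAS AND PROOFS =====
lemma fbg_foldl_eq (w : Int) (l : List (Int × Char)) (b g o : List (Int × Int)) :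
    l.foldl
      (fun (acc : (List (Int × Int)) × (List (Int × Int)) × (List (Int × Int))) pc =>
        let pos := pc.1
        let char := pc.2
        if char = 'B' then
          (acc.1 ++ [(PySem.Int.floordiv pos w, PySem.Int.mod pos w)], acc.2.1, acc.2.2)
        else if char = 'G' ∨ char = 'L' then
          (acc.1, acc.2.1 ++ [(PySem.Int.floordiv pos w, PySem.Int.mod pos w)], acc.2.2)
        else if char = 'O' then
          (acc.1, acc.2.1, acc.2.2 ++ [(PySem.Int.floordiv pos w, PySem.Int.mod pos w)])
        else acc)
      (b, g, o)
    = (b ++ (l.filter (fun pc => pc.2 = 'B')).map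
          (fun pc => (PySem.Int.floordiv pc.1 w, PySem.Int.mod pc.1 w)),
       g ++ (l.filter (fun pc => pc.2 = 'G' ∨ pc.2 = 'L')).map
          (fun pc => (PySem.Int.floordiv pc.1 w, PySem.Int.mod pc.1 w)),
       o ++ (l.filter (fun pc => pc.2 = 'O')).map
          (fun pc => (PySem.Int.floordiv pc.1 w, PySem.Int.mod pc.1 w))) := by
  induction l generalizing b g o with
  | nil => simp
  | cons hd tl ih =>
    simp only [List.foldl_cons, List.filter_cons]
    by_cases hB : hd.2 = 'B'
    · simp [hB, ih]
    · by_cases hGL : hd.2 = 'G' ∨ hd.2 = 'L'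
      · have hO' : hd.2 ≠ 'O' := by rcases hGL with h | h <;> simp [h]
        simp [hB, hGL, hO', ih]
      · by_cases hO : hd.2 = 'O'
        · simp [hO, ih]
        · simp [hB, hGL, hO, ih]


-- ===== VERDICT (by name: the statement is the Claim_ definition above) =====
theorem find_boxes_and_goals_spec : Claim_equal_find_boxes_and_goals := by
  intro state shape _ _
  unfold Spec_find_boxes_and_goals find_boxes_and_goals find_boxes_and_goals_alt
  simpa using fbg_foldl_eq shape.2 (PySem.List.enumerate state.toList) [] [] []
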